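-- pv_equiv track=rewrite | github.com/seanbarlow/doit | src/doit_cli/services/cleanup_service.py | _build_tech_stack
-- ===== SOURCE A (Python) =====
-- from typing import Optional
--
-- TECH_STACK_CROSS_REF = (
--     "\n> **See also**: [Constitution](constitution.md) for project "
--     "principles and governance.\n"
-- )
--
-- def _build_tech_stack(
--
--     project_name: str,
--     tech_sections: dict[str, str],
--     existing_content: Optional[str] = None,
-- ) -> str:
--     """Build tech-stack.md content.
--
--     Args:
--         project_name: Name of the project.
--         tech_sections: Dict of section name to content.
--         existing_content: Existing tech-stack content to merge.
--
--     Returns: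
--         Complete tech-stack.md content.
--     """
--     lines = [
--         f"# {project_name} Tech Stack",
--         TECH_STACK_CROSS_REF,
--     ]
--
--     # Add extracted sections
--     for _section_name, content in tech_sections.items():
--         lines.append(content)
--         lines.append("")
--
--     # If merging, add existing content that isn't duplicate
--     if existing_content:
--         # Skip header and cross-reference from existing
--         existing_lines = existing_content.split("\n")
--         skip_until_section = True
--         for line in existing_lines:
--             if skip_until_section:
--                 if line.startswith("## "):
--                     skip_until_section = False
--                     lines.append(line)
--             else:
--                 lines.append(line)
--
--     return "\n".join(lines)
-- ===== SOURCE B (Python) =====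
-- from typing import Optional
--
-- TECH_STACK_CROSS_REF = (
--     "\n> **See also**: [Constitution](constitution.md) for project "
--     "principles and governance.\n"
-- )
--
-- def _build_tech_stack(
--     project_name: str,
--     tech_sections: dict[str, str],
--     existing_content: Optional[str] = None,
-- ) -> str:
--     # Build the result directly as one string; no line list is ever built.
--     out = f"# {project_name} Tech Stack\n{TECH_STACK_CROSS_REF}"
--     for content in tech_sections.values():
--         out += "\n" + content + "\n"
--     if existing_content:
--         # The merged tail is the raw substring of existing_content from the
--         # first line that starts with "## ": either the whole string, or the
--         # suffix after the first occurrence of "\n## ".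
--         if existing_content.startswith("## "):
--             out += "\n" + existing_content
--         else:
--             j = existing_content.find("\n## ")
--             if j != -1:
--                 out += "\n" + existing_content[j + 1:]
--     return out
-- ===== Notes on version B (the rewrite author's own statement) =====
-- stated objective: alternative
-- what changed: B never builds a list of lines: it accumulates the whole document as one string by concatenation, and locates the merged tail by a raw substring search on existing_content (whole string if it starts with '## ', else the suffix after the first occurrence of '\n## '), instead of A's split-into-lines plus skip_until_section state machine over a line list that is joined at the end.
import Mathlib
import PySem

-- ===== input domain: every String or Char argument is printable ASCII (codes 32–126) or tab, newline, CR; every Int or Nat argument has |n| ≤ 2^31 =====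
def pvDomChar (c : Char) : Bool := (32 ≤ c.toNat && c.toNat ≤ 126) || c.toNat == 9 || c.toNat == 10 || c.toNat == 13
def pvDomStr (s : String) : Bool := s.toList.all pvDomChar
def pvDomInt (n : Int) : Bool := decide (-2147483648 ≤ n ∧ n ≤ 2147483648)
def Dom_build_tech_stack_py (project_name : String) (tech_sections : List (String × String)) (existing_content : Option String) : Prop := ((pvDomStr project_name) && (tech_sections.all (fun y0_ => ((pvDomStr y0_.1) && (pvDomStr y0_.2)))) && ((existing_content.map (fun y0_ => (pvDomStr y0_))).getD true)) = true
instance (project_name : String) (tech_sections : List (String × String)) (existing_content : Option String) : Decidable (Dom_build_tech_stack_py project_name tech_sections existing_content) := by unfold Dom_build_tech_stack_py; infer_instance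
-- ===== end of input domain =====

-- B builds the result as ONE string by direct concatenation — no line list is ever built:
-- the merged tail is located by a raw substring search ("## " prefix or first "\n## ") instead
-- of A's split-into-lines state machine; objective: alternative (same O(n) cost).

def pvCrossRef : String :=
  "\n> **See also**: [Constitution](constitution.md) for project principles and governance.\n"

-- ===== PORT A =====
def build_tech_stack_py (project_name : String) (tech_sections : List (String × String)) (existing_content : Option String) : String :=
  let lines : List String := ["# " ++ project_name ++ " Tech Stack", pvCrossRef]
  -- for _section_name, content in tech_sections.items(): lines.append(content); lines.append("")
  let lines := tech_sections.foldl (fun acc kv => acc ++ [kv.2] ++ [""]) lines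
  -- if existing_content: (Python truthiness: None and "" are falsy)
  let lines :=
    match existing_content with
    | none => lines
    | some s =>
      if s = "" then lines
      else
        let existing_lines := (PySem.Str.split? s "\n").getD []  -- sep "\n" ≠ "", so split? is some
        -- skip_until_section state machine
        let st := existing_lines.foldl
          (fun (st : Bool × List String) line =>
            if st.1 then
              if PySem.Str.startswith line "## " then (false, st.2 ++ [line]) else st
            else (st.1, st.2 ++ [line]))
          (true, lines)
        st.2
  PySem.Str.join "\n" lines

-- ===== PORT B =====
-- Source B accumulates one Python str by '+='; the port carries that string as its char list
-- (PySem string functions are defined on List Char) and wraps it once at the end.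
def build_tech_stack_py_alt (project_name : String) (tech_sections : List (String × String)) (existing_content : Option String) : String :=
  let out : List Char := ("# " ++ project_name ++ " Tech Stack").toList ++ '\n' :: pvCrossRef.toList
  -- for content in tech_sections.values(): out += "\n" + content + "\n"
  let out := tech_sections.foldl (fun acc kv => acc ++ '\n' :: kv.2.toList ++ ['\n']) out
  let out :=
    match existing_content with
    | none => out
    | some s =>
      if s = "" then out
      else if PySem.Chars.startswith s.toList "## ".toList then
        out ++ '\n' :: s.toList
      else
        -- j = existing_content.find("\n## ");  if j != -1: out += "\n" + existing_content[j+1:]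
        let j := PySem.Chars.find s.toList "\n## ".toList
        if j = -1 then out
        else out ++ '\n' :: PySem.Chars.slice s.toList (some (j + 1)) none
  String.ofList out

-- ===== PRECONDITION & SPEC =====
def Spec_build_tech_stack_py (project_name : String) (tech_sections : List (String × String)) (existing_content : Option String) (out : String) : Prop := out = build_tech_stack_py_alt project_name tech_sections existing_content
instance (project_name : String) (tech_sections : List (String × String)) (existing_content : Option String) (out : String) : Decidable (Spec_build_tech_stack_py project_name tech_sections existing_content out) := by unfold Spec_build_tech_stack_py; infer_instance

-- ===== CLAIM (what is proved, stated in full; the proofs are below) =====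
def Claim_equal_build_tech_stack_py : Prop := ∀ (project_name : String) (tech_sections : List (String × String)) (existing_content : Option String), Dom_build_tech_stack_py project_name tech_sections existing_content → Spec_build_tech_stack_py project_name tech_sections existing_content (build_tech_stack_py project_name tech_sections existing_content)

-- ===== LEMMAS AND PROOFS =====


theorem modifyHead_triv (l : List (List Char)) : l.modifyHead (fun t => t) = l := by
  cases l <;> rfl

theorem splitOn_go_eq (fuel : Nat) (l cur : List Char) (acc : List (List Char)) (h : l.length ≤ fuel) :
    PySem.Chars.splitOn.go ['\n'] fuel l cur acc
      = acc.reverse ++ (l.splitOn '\n').modifyHead (fun t => cur.reverse ++ t) := by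
  induction fuel generalizing l cur acc with
  | zero =>
    have : l = [] := List.eq_nil_of_length_eq_zero (Nat.le_zero.mp h)
    subst this
    simp [PySem.Chars.splitOn.go, List.splitOn]
  | succ fuel ih =>
    cases l with
    | nil => simp [PySem.Chars.splitOn.go, List.splitOn]
    | cons c rest =>
      by_cases hc : c = '\n'
      · subst hc
        have hpre : List.isPrefixOf ['\n'] ('\n' :: rest) = true := by
          simp [List.isPrefixOf]
        rw [PySem.Chars.splitOn.go]
        simp only [hpre, if_true]
        show PySem.Chars.splitOn.go ['\n'] fuel rest [] (cur.reverse :: acc) = _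
        rw [ih rest [] (cur.reverse :: acc) (by simpa using Nat.le_of_succ_le_succ h)]
        simp [List.splitOn, List.splitOnP_cons]
        exact modifyHead_triv _
      · have hpre : List.isPrefixOf ['\n'] (c :: rest) = false := by
          simp [List.isPrefixOf]
          intro hcc; exact absurd hcc.symm hc
        rw [PySem.Chars.splitOn.go]
        simp only [hpre]
        rw [ih rest (c :: cur) acc (by simpa using Nat.le_of_succ_le_succ h)]
        simp [List.splitOn, List.splitOnP_cons, hc, List.modifyHead_modifyHead]
        rfl

theorem chars_splitOn_eq (cs : List Char) :
    PySem.Chars.splitOn cs ['\n'] = cs.splitOn '\n' := by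
  rw [PySem.Chars.splitOn, splitOn_go_eq _ _ _ _ (by omega)]
  simp
  exact modifyHead_triv _

theorem intercalateNL_cons_cons (a b : List Char) (t : List (List Char)) :
    ['\n'].intercalate (a :: b :: t) = a ++ '\n' :: ['\n'].intercalate (b :: t) := by
  simp [List.intercalate, List.intersperse]

theorem prefix_firstline (p cs h : List Char) (T : List (List Char))
    (hnl : '\n' ∉ p) (hs : cs.splitOn '\n' = h :: T) :
    p.isPrefixOf h = p.isPrefixOf cs := by
  induction cs generalizing p h T with
  | nil =>
    simp [List.splitOn] at hs
    simp [hs.1]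
  | cons c rest ih =>
    by_cases hc : c = '\n'
    · subst hc
      simp [List.splitOn, List.splitOnP_cons] at hs
      cases p with
      | nil => simp [List.isPrefixOf]
      | cons q p' =>
        have hq : q ≠ '\n' := fun hq => hnl (hq ▸ List.mem_cons_self)
        rw [hs.1]
        simp [List.isPrefixOf, hq]
    · simp only [List.splitOn, List.splitOnP_cons] at hs
      rw [if_neg (by simp [hc])] at hs
      obtain ⟨h', T', hsplit⟩ := List.exists_cons_of_ne_nil (List.splitOnP_ne_nil (· == '\n') rest)
      rw [hsplit] at hs
      simp at hs
      cases p with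
      | nil => simp [List.isPrefixOf]
      | cons q p' =>
        rw [← hs.1]
        simp only [List.isPrefixOf]
        rw [ih p' h' T' (fun hm => hnl (List.mem_cons_of_mem _ hm)) hsplit]

theorem findgo_nonneg (c0 : Char) (sub' : List Char) (cs : List Char) (k : Nat) :
    PySem.Chars.find.go (c0 :: sub') cs k = -1
      ∨ (k : Int) ≤ PySem.Chars.find.go (c0 :: sub') cs k := by
  induction cs generalizing k with
  | nil => left; simp [PySem.Chars.find.go, List.isEmpty]
  | cons c rest ih =>
    rw [PySem.Chars.find.go]
    by_cases hp : (c0 :: sub').isPrefixOf (c :: rest) = true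
    · right; simp [hp]
    · simp only [Bool.not_eq_true] at hp
      simp only [hp, Bool.false_eq_true, if_false]
      rcases ih (k+1) with h | h
      · left; exact h
      · right; omega

theorem find_nonneg (c0 : Char) (sub' : List Char) (cs : List Char) :
    PySem.Chars.find cs (c0 :: sub') = -1 ∨ 0 ≤ PySem.Chars.find cs (c0 :: sub') := by
  rcases findgo_nonneg c0 sub' cs 0 with h | h
  · left; exact h
  · right; exact_mod_cast h

theorem findgo_shift (c0 : Char) (sub' : List Char) (cs : List Char) (k : Nat) :
    PySem.Chars.find.go (c0 :: sub') cs k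
      = if PySem.Chars.find cs (c0 :: sub') = -1 then -1
        else PySem.Chars.find cs (c0 :: sub') + k := by
  induction cs generalizing k with
  | nil => simp [PySem.Chars.find, PySem.Chars.find.go, List.isEmpty]
  | cons c rest ih =>
    rw [PySem.Chars.find.go]
    by_cases hp : (c0 :: sub').isPrefixOf (c :: rest) = true
    · simp [PySem.Chars.find, PySem.Chars.find.go, hp]
    · simp only [Bool.not_eq_true] at hp
      rw [PySem.Chars.find]
      rw [PySem.Chars.find.go]
      simp only [hp, if_false, Bool.false_eq_true]
      rw [ih (k+1), ih 1]
      by_cases hf : PySem.Chars.find rest (c0 :: sub') = -1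
      · simp [hf]
      · have h0 : PySem.Chars.find rest (c0 :: sub') + 1 ≠ -1 := by
          rcases find_nonneg c0 sub' rest with h | h
          · exact absurd h hf
          · omega
        simp [hf, h0]
        omega

theorem find_cons_pos (c0 : Char) (sub' : List Char) (c : Char) (rest : List Char)
    (hp : (c0 :: sub').isPrefixOf (c :: rest) = true) :
    PySem.Chars.find (c :: rest) (c0 :: sub') = 0 := by
  rw [PySem.Chars.find, PySem.Chars.find.go]
  simp [hp]

theorem find_cons_neg (c0 : Char) (sub' : List Char) (c : Char) (rest : List Char)
    (hp : (c0 :: sub').isPrefixOf (c :: rest) = false) :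
    PySem.Chars.find (c :: rest) (c0 :: sub')
      = if PySem.Chars.find rest (c0 :: sub') = -1 then -1
        else PySem.Chars.find rest (c0 :: sub') + 1 := by
  rw [PySem.Chars.find, PySem.Chars.find.go]
  simp only [hp, Bool.false_eq_true, if_false]
  rw [findgo_shift]
  simp

theorem find_nil (c0 : Char) (sub' : List Char) :
    PySem.Chars.find [] (c0 :: sub') = -1 := by
  simp [PySem.Chars.find, PySem.Chars.find.go, List.isEmpty]

-- search strictly after a newline: A's line scan over the TAIL lines of cs
theorem key_after_newline (cs : List Char) :
    (match ((cs.splitOn '\n').tail).findIdx? (fun l => ("## ".toList).isPrefixOf l) with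
     | none => ([] : List Char)
     | some i => '\n' :: ['\n'].intercalate (((cs.splitOn '\n').tail).drop i))
    = (if PySem.Chars.find cs ('\n' :: "## ".toList) = -1 then ([] : List Char)
       else '\n' :: cs.drop ((PySem.Chars.find cs ('\n' :: "## ".toList)).toNat + 1)) := by
  induction cs with
  | nil =>
    rw [find_nil]
    simp [List.splitOn]
  | cons c rest ih =>
    by_cases hc : c = '\n'
    · subst hc
      have hsp : (('\n' :: rest).splitOn '\n').tail = rest.splitOn '\n' := by
        simp [List.splitOn, List.splitOnP_cons]
      obtain ⟨h, T, hsplit⟩ := List.exists_cons_of_ne_nil (List.splitOnP_ne_nil (fun x => x == '\n') rest)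
      have hsplit' : rest.splitOn '\n' = h :: T := hsplit
      have hfl : ("## ".toList).isPrefixOf h = ("## ".toList).isPrefixOf rest :=
        prefix_firstline _ _ _ _ (by decide) hsplit'
      by_cases hP : ("## ".toList).isPrefixOf rest = true
      · have hpre : ('\n' :: "## ".toList).isPrefixOf ('\n' :: rest) = true := by
          show (('\n' == '\n') && ("## ".toList).isPrefixOf rest) = true
          simp only [beq_self_eq_true, Bool.true_and]
          exact hP
        rw [find_cons_pos _ _ _ _ hpre]
        rw [hsp, hsplit']
        rw [List.findIdx?_cons, hfl.trans hP]
        have hj : ['\n'].intercalate (h :: T) = rest := by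
          rw [← hsplit']; exact List.intercalate_splitOn rest '\n'
        simp [hj]
      · simp only [Bool.not_eq_true] at hP
        have hpre : ('\n' :: "## ".toList).isPrefixOf ('\n' :: rest) = false := by
          show (('\n' == '\n') && ("## ".toList).isPrefixOf rest) = false
          simp only [beq_self_eq_true, Bool.true_and]
          exact hP
        rw [find_cons_neg _ _ _ _ hpre]
        rw [hsp, hsplit']
        rw [List.findIdx?_cons, hfl.trans hP]
        simp only [Bool.false_eq_true, if_false]
        rw [hsplit'] at ih
        simp only [List.tail_cons] at ih
        by_cases hf : PySem.Chars.find rest ('\n' :: "## ".toList) = -1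
        · rw [if_pos hf]
          rw [if_pos hf] at ih
          cases hT : T.findIdx? (fun l => ("## ".toList).isPrefixOf l) with
          | none => simp
          | some i => rw [hT] at ih; simp at ih
        · rw [if_neg hf]
          rw [if_neg hf] at ih
          have hge : 0 ≤ PySem.Chars.find rest ('\n' :: "## ".toList) := by
            rcases find_nonneg _ _ rest with hh | hh
            · exact absurd hh hf
            · exact hh
          have h1 : PySem.Chars.find rest ('\n' :: "## ".toList) + 1 ≠ -1 := by omega
          rw [if_neg h1]
          have h2 : (PySem.Chars.find rest ('\n' :: "## ".toList) + 1).toNat + 1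
              = ((PySem.Chars.find rest ('\n' :: "## ".toList)).toNat + 1) + 1 := by omega
          rw [h2, List.drop_succ_cons]
          cases hT : T.findIdx? (fun l => ("## ".toList).isPrefixOf l) with
          | none => rw [hT] at ih; simp at ih
          | some i =>
            rw [hT] at ih
            simp only [Option.map_some, List.drop_succ_cons]
            exact ih
    · -- c ≠ '\n' : tail of splitOn unchanged, find shifts by one
      obtain ⟨h, T, hsplit⟩ := List.exists_cons_of_ne_nil (List.splitOnP_ne_nil (fun x => x == '\n') rest)
      have hsp : ((c :: rest).splitOn '\n').tail = (rest.splitOn '\n').tail := by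
        simp only [List.splitOn, List.splitOnP_cons]
        rw [if_neg (by simp [hc])]
        rw [hsplit]
        simp
      have hpre : ('\n' :: "## ".toList).isPrefixOf (c :: rest) = false := by
        show (('\n' == c) && ("## ".toList).isPrefixOf rest) = false
        have : ('\n' == c) = false := by
          simp only [beq_eq_false_iff_ne]; exact fun hcc => hc hcc.symm
        rw [this, Bool.false_and]
      rw [find_cons_neg _ _ _ _ hpre, hsp]
      by_cases hf : PySem.Chars.find rest ('\n' :: "## ".toList) = -1
      · rw [if_pos hf]
        rw [if_pos hf] at ih
        exact ih
      · rw [if_neg hf]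
        rw [if_neg hf] at ih
        have hge : 0 ≤ PySem.Chars.find rest ('\n' :: "## ".toList) := by
          rcases find_nonneg _ _ rest with hh | hh
          · exact absurd hh hf
          · exact hh
        have h1 : PySem.Chars.find rest ('\n' :: "## ".toList) + 1 ≠ -1 := by omega
        rw [if_neg h1]
        have h2 : (PySem.Chars.find rest ('\n' :: "## ".toList) + 1).toNat + 1
            = ((PySem.Chars.find rest ('\n' :: "## ".toList)).toNat + 1) + 1 := by omega
        rw [h2, List.drop_succ_cons]
        exact ih

theorem key_tail (cs : List Char) :
    (match (cs.splitOn '\n').findIdx? (fun l => ("## ".toList).isPrefixOf l) with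
     | none => ([] : List Char)
     | some i => '\n' :: ['\n'].intercalate ((cs.splitOn '\n').drop i))
    = (if ("## ".toList).isPrefixOf cs = true then '\n' :: cs
       else if PySem.Chars.find cs ('\n' :: "## ".toList) = -1 then ([] : List Char)
       else '\n' :: cs.drop ((PySem.Chars.find cs ('\n' :: "## ".toList)).toNat + 1)) := by
  obtain ⟨h, T, hsplit⟩ := List.exists_cons_of_ne_nil (List.splitOnP_ne_nil (fun x => x == '\n') cs)
  have hsplit' : cs.splitOn '\n' = h :: T := hsplit
  have hfl : ("## ".toList).isPrefixOf h = ("## ".toList).isPrefixOf cs :=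
    prefix_firstline _ _ _ _ (by decide) hsplit'
  rw [hsplit', List.findIdx?_cons, hfl]
  by_cases hP : ("## ".toList).isPrefixOf cs = true
  · rw [hP]
    have hj : ['\n'].intercalate (h :: T) = cs := by
      rw [← hsplit']; exact List.intercalate_splitOn cs '\n'
    simp [hj]
  · simp only [Bool.not_eq_true] at hP
    rw [hP]
    simp only [Bool.false_eq_true, if_false]
    have hq := key_after_newline cs
    rw [hsplit'] at hq
    simp only [List.tail_cons] at hq
    rw [← hq]
    cases hT : T.findIdx? (fun l => ("## ".toList).isPrefixOf l) with
    | none => simp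
    | some i => simp [List.drop_succ_cons]


-- Once skipping is over (state False), A's fold just appends every remaining line.
theorem fold_noskip (p : String → Bool) (ls : List String) (acc : List String) :
    (ls.foldl
      (fun (st : Bool × List String) line =>
        if st.1 then
          if p line then (false, st.2 ++ [line]) else st
        else (st.1, st.2 ++ [line]))
      (false, acc)) = (false, acc ++ ls) := by
  induction ls generalizing acc with
  | nil => simp
  | cons l ls ih => simp [List.foldl_cons, ih, List.append_assoc]

-- From state True, A's fold accumulates acc plus the tail of ls from its first p-line.
theorem fold_skip (p : String → Bool) (ls : List String) (acc : List String) :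
    ((ls.foldl
      (fun (st : Bool × List String) line =>
        if st.1 then
          if p line then (false, st.2 ++ [line]) else st
        else (st.1, st.2 ++ [line]))
      (true, acc))).2
    = acc ++ (match ls.findIdx? p with
              | none => []
              | some i => ls.drop i) := by
  induction ls generalizing acc with
  | nil => simp
  | cons l ls ih =>
    by_cases h : p l = true
    · simp [List.foldl_cons, h, fold_noskip, List.findIdx?_cons, List.append_assoc]
    · simp only [List.foldl_cons, h, if_neg, Bool.false_eq_true, not_false_iff, if_true, ih]
      simp [List.findIdx?_cons, h]
      cases hf : ls.findIdx? p <;> simp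

-- ===== assembly lemmas =====

theorem mapBase (ts : List (String × String)) (init : List String) :
    (ts.foldl (fun acc kv => acc ++ [kv.2] ++ [""]) init).map String.toList
      = ts.foldl (fun acc kv => acc ++ [kv.2.toList, []]) (init.map String.toList) := by
  induction ts generalizing init with
  | nil => rfl
  | cons kv ts ih =>
    simp only [List.foldl_cons]
    rw [ih]
    simp

theorem foldlCharsNe (ts : List (String × String)) (acc : List (List Char)) (h : acc ≠ []) :
    ts.foldl (fun a kv => a ++ [kv.2.toList, []]) acc ≠ [] := by
  induction ts generalizing acc with
  | nil => exact h
  | cons kv ts ih => exact ih _ (by simp)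

theorem joinNL_append (xs ys : List (List Char)) (hx : xs ≠ []) (hy : ys ≠ []) :
    ['\n'].intercalate (xs ++ ys) = ['\n'].intercalate xs ++ '\n' :: ['\n'].intercalate ys := by
  induction xs with
  | nil => exact absurd rfl hx
  | cons a xs ih =>
    cases xs with
    | nil =>
      cases ys with
      | nil => exact absurd rfl hy
      | cons b ys => simp [List.intercalate]
    | cons a' xs' =>
      have h2 := ih (by simp)
      simp only [List.cons_append] at h2 ⊢
      rw [intercalateNL_cons_cons, h2, intercalateNL_cons_cons]
      simp

theorem headerJoin (ts : List (String × String)) (acc : List (List Char)) (h : acc ≠ []) :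
    ['\n'].intercalate (ts.foldl (fun a kv => a ++ [kv.2.toList, []]) acc)
      = ts.foldl (fun a kv => a ++ '\n' :: kv.2.toList ++ ['\n']) (['\n'].intercalate acc) := by
  induction ts generalizing acc with
  | nil => rfl
  | cons kv ts ih =>
    simp only [List.foldl_cons]
    rw [ih _ (by simp)]
    congr 1
    rw [joinNL_append acc [kv.2.toList, []] h (by simp)]
    rw [intercalateNL_cons_cons]
    simp [List.intercalate]

theorem split_str_eq (s : String) :
    (PySem.Str.split? s "\n").getD []
      = (s.toList.splitOn '\n').map String.ofList := by
  rw [PySem.Str.split?]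
  have h1 : "\n".toList = ['\n'] := rfl
  rw [h1]
  rw [PySem.Chars.split?]
  simp [List.isEmpty, chars_splitOn_eq]

-- ===== VERDICT (by name: the statement is the Claim_ definition above) =====
theorem build_tech_stack_py_spec : Claim_equal_build_tech_stack_py := by
  intro pn ts ec _
  unfold Spec_build_tech_stack_py build_tech_stack_py build_tech_stack_py_alt
  -- notation
  have hnl : "\n".toList = ['\n'] := rfl
  -- base equality (chars): A's joined base lines = B's accumulated base chars
  have hbase : ['\n'].intercalate
        ((ts.foldl (fun acc kv => acc ++ [kv.2] ++ [""]) ["# " ++ pn ++ " Tech Stack", pvCrossRef]).map String.toList)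
      = ts.foldl (fun acc kv => acc ++ '\n' :: kv.2.toList ++ ['\n'])
          (("# " ++ pn ++ " Tech Stack").toList ++ '\n' :: pvCrossRef.toList) := by
    rw [mapBase]
    rw [headerJoin _ _ (by simp)]
    congr 1
  cases ec with
  | none =>
    dsimp only
    rw [PySem.Str.join]
    rw [hnl]
    rw [show PySem.Chars.join ['\n'] = fun l => ['\n'].intercalate l from rfl]
    simp only []
    rw [hbase]
  | some s =>
    by_cases hs : s = ""
    · dsimp only
      rw [if_pos hs, if_pos hs]
      rw [PySem.Str.join, hnl]
      rw [show PySem.Chars.join ['\n'] = fun l => ['\n'].intercalate l from rfl]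
      simp only []
      rw [hbase]
    · dsimp only
      rw [if_neg hs, if_neg hs]
      rw [fold_skip]
      rw [split_str_eq]
      rw [List.findIdx?_map]
      have hpred : ((fun line => PySem.Str.startswith line "## ") ∘ String.ofList)
          = (fun l => ("## ".toList).isPrefixOf l) := by
        funext l
        simp [Function.comp, PySem.Str.startswith, PySem.Chars.startswith, String.toList_ofList]
      rw [hpred]
      rw [PySem.Str.join, hnl]
      rw [show PySem.Chars.join ['\n'] = fun l => ['\n'].intercalate l from rfl]
      simp only []
      -- A's chars
      set L := s.toList.splitOn '\n' with hL
      cases hM : L.findIdx? (fun l => ("## ".toList).isPrefixOf l) with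
      | none =>
        simp only []
        rw [List.append_nil]
        rw [hbase]
        -- B side: key_tail says the B tail is []
        have hk := key_tail s.toList
        rw [← hL, hM] at hk
        simp only [] at hk
        by_cases hsw : PySem.Chars.startswith s.toList "## ".toList = true
        · rw [show PySem.Chars.startswith s.toList "## ".toList = ("## ".toList).isPrefixOf s.toList from rfl] at hsw
          rw [hsw] at hk
          simp at hk
        · rw [Bool.not_eq_true] at hsw
          rw [if_neg (by simp only [Bool.not_eq_true]; exact hsw)]
          rw [show PySem.Chars.startswith s.toList "## ".toList = ("## ".toList).isPrefixOf s.toList from rfl] at hsw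
          rw [hsw] at hk
          simp only [Bool.false_eq_true, if_false] at hk
          have hts : "\n## ".toList = '\n' :: "## ".toList := rfl
          by_cases hf : PySem.Chars.find s.toList "\n## ".toList = -1
          · rw [if_pos hf]
          · rw [hts] at hf
            rw [if_neg hf] at hk
            simp at hk
      | some i =>
        simp only []
        rw [List.map_append]
        have hdm : (List.map String.ofList L).drop i = List.map String.ofList (L.drop i) := by
          rw [List.map_drop]
        rw [hdm]
        rw [List.map_map]
        rw [show String.toList ∘ String.ofList = id from funext (fun l => String.toList_ofList)]
        rw [List.map_id]
        have hiL : i < L.length := by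
          rcases (List.findIdx?_eq_some_iff_findIdx_eq).mp hM with ⟨h1, _⟩
          exact h1
        rw [joinNL_append _ _ (by
              intro hcon
              have := foldlCharsNe ts (["# " ++ pn ++ " Tech Stack", pvCrossRef].map String.toList) (by simp)
              rw [← mapBase] at this
              exact this hcon)
            (by
              intro hcon
              rw [List.drop_eq_nil_iff] at hcon
              omega)]
        rw [hbase]
        -- B side via key_tail
        have hk := key_tail s.toList
        rw [← hL, hM] at hk
        simp only [] at hk
        have hts : "\n## ".toList = '\n' :: "## ".toList := rfl
        by_cases hsw : ("## ".toList).isPrefixOf s.toList = true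
        · rw [hsw] at hk
          simp only [if_pos] at hk
          rw [if_pos (show PySem.Chars.startswith s.toList "## ".toList = true from hsw)]
          have hk2 : ('\n' :: ['\n'].intercalate (List.drop i L) : List Char) = '\n' :: s.toList := by
            rw [hk]
          rw [hk2]
        · rw [Bool.not_eq_true] at hsw
          rw [hsw] at hk
          simp only [Bool.false_eq_true, if_false] at hk
          rw [if_neg (by simp only [Bool.not_eq_true]; exact (show PySem.Chars.startswith s.toList "## ".toList = false from hsw))]
          by_cases hf : PySem.Chars.find s.toList ('\n' :: "## ".toList) = -1
          · rw [if_pos hf] at hk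
            simp at hk
          · rw [if_neg hf] at hk
            rw [if_neg (by rw [hts]; exact hf)]
            rw [hk]
            congr 2
            -- slice = drop
            have hge : 0 ≤ PySem.Chars.find s.toList ('\n' :: "## ".toList) := by
              rcases find_nonneg _ _ s.toList with hh | hh
              · exact absurd hh hf
              · exact hh
            rw [hts]
            show _ = '\n' :: PySem.List.slice s.toList (some (PySem.Chars.find s.toList ('\n' :: "## ".toList) + 1)) none
            rw [PySem.List.slice_from _ (by omega : (0:Int) ≤ PySem.Chars.find s.toList ('\n' :: "## ".toList) + 1)]
            congr 2
            omega
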